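-- pv_equiv track=rewrite | github.com/Roger/couchdb-python | couchdb/design.py | _strip_decorators
-- ===== SOURCE A (Python) =====
-- def _strip_decorators(code):
--     retval = []
--     beginning = True
--     for line in code.splitlines():
--         if beginning and not line.isspace():
--             if line.lstrip().startswith('@'):
--                 continue
--             beginning = False
--         retval.append(line)
--     return '\n'.join(retval)
-- ===== SOURCE B (Python) =====
-- def _strip_decorators(code):
--     lines = code.splitlines()
--     stop = next((i for i, line in enumerate(lines)
--                  if not line.isspace() and not line.lstrip().startswith('@')),
--                 len(lines))
--     kept = [line for line in lines[:stop] if line.isspace()]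
--     return '\n'.join(kept + lines[stop:])
-- ===== Notes on version B (the rewrite author's own statement) =====
-- stated objective: alternative
-- what changed: Replaces A's flag-driven single append loop with a find-the-cutoff-index decomposition: locate the first non-whitespace non-decorator line, keep only whitespace-only lines before it, and concatenate the untouched tail.
import Mathlib
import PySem

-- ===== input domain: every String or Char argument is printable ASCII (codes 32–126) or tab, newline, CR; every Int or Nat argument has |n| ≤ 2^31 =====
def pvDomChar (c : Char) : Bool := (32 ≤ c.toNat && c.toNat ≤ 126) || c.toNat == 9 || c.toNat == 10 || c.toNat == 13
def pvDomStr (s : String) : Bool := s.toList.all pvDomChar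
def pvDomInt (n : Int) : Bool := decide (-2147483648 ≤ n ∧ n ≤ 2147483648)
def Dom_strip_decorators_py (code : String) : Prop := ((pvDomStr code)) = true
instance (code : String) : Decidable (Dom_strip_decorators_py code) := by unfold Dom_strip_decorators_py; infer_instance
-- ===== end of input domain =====

-- B replaces A's flag-driven append loop by a find-the-cutoff index plus a
-- filter/concatenate of the two slices (objective: alternative decomposition).

-- ===== PORT A =====
-- state = (retval, beginning); one step of A's for-loop body
def pvStepA (st : List String × Bool) (line : String) : List String × Bool :=
  if st.2 && !(PySem.Str.strIsspace line) then
    if PySem.Str.startswith (PySem.Str.lstrip line) "@" then st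
    else (st.1 ++ [line], false)
  else (st.1 ++ [line], st.2)

def strip_decorators_py (code : String) : String :=
  PySem.Str.join "\n" ((PySem.Str.splitlines code).foldl pvStepA ([], true)).1

-- ===== PORT B =====
-- the predicate of B's `next(... if not line.isspace() and not line.lstrip().startswith('@'))`
def pvCut (line : String) : Bool :=
  !(PySem.Str.strIsspace line) && !(PySem.Str.startswith (PySem.Str.lstrip line) "@")

def strip_decorators_py_alt (code : String) : String :=
  let lines := PySem.Str.splitlines code
  let stop := lines.findIdx pvCut      -- = len(lines) if no line satisfies pvCut, as in B
  let kept := (lines.take stop).filter PySem.Str.strIsspace  -- lines[:stop], stop ≥ 0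
  PySem.Str.join "\n" (kept ++ lines.drop stop)

-- ===== PRECONDITION & SPEC =====
def Spec_strip_decorators_py (code : String) (out : String) : Prop := out = strip_decorators_py_alt code
instance (code : String) (out : String) : Decidable (Spec_strip_decorators_py code out) := by unfold Spec_strip_decorators_py; infer_instance

-- ===== CLAIM (what is proved, stated in full; the proofs are below) =====
def Claim_equal_strip_decorators_py : Prop := ∀ (code : String), Dom_strip_decorators_py code → Spec_strip_decorators_py code (strip_decorators_py code)

-- ===== LEMMAS AND PROOFS =====

-- once beginning = false, A just appends every remaining line
theorem pv_foldl_false (ls : List String) (acc : List String) :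
    ls.foldl pvStepA (acc, false) = (acc ++ ls, false) := by
  induction ls generalizing acc with
  | nil => simp
  | cons l ls ih =>
      rw [List.foldl_cons]
      show ls.foldl pvStepA (if (false && !(PySem.Str.strIsspace l)) = true then _ else _) = _
      rw [if_neg (by simp only [Bool.false_and]; exact Bool.false_ne_true)]
      rw [ih]; simp

-- A's loop from beginning = true produces exactly B's two-part list
theorem pv_foldl_true (ls : List String) (acc : List String) :
    (ls.foldl pvStepA (acc, true)).1 =
      acc ++ ((ls.take (ls.findIdx pvCut)).filter PySem.Str.strIsspace
              ++ ls.drop (ls.findIdx pvCut)) := by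
  induction ls generalizing acc with
  | nil => simp
  | cons l ls ih =>
      rw [List.foldl_cons]
      show (ls.foldl pvStepA (if (true && !(PySem.Str.strIsspace l)) = true then _ else _)).1 = _
      cases hs : PySem.Str.strIsspace l with
      | true =>
          have hcut : pvCut l = false := by
            simp only [pvCut, hs, Bool.not_true, Bool.false_and]
          rw [if_neg (by decide)]
          rw [ih, List.findIdx_cons, hcut]
          simp only [cond_false, List.take_succ_cons, List.drop_succ_cons,
            List.filter_cons_of_pos hs, List.cons_append,
            List.append_assoc, List.nil_append]
      | false =>
          rw [if_pos (by decide)]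
          cases hd : PySem.Str.startswith (PySem.Str.lstrip l) "@" with
          | true =>
              have hcut : pvCut l = false := by
                simp only [pvCut, hd, Bool.not_true, Bool.and_false]
              rw [if_pos rfl]
              rw [ih, List.findIdx_cons, hcut]
              simp only [cond_false, List.take_succ_cons, List.drop_succ_cons,
                List.filter_cons, hs, Bool.false_eq_true, if_false]
          | false =>
              have hcut : pvCut l = true := by
                simp only [pvCut, hs, hd, Bool.not_false, Bool.and_self]
              rw [if_neg (by decide)]
              rw [pv_foldl_false, List.findIdx_cons, hcut]
              simp only [cond_true, List.take_zero, List.filter_nil, List.drop_zero,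
                List.nil_append, List.cons_append, List.append_assoc]

-- ===== VERDICT (by name: the statement is the Claim_ definition above) =====
theorem strip_decorators_py_spec : Claim_equal_strip_decorators_py := by
  intro code _
  unfold Spec_strip_decorators_py strip_decorators_py strip_decorators_py_alt
  rw [pv_foldl_true]
  simp
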